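-- pv_equiv track=rewrite | github.com/TobiasOmdal/algorithms | Car_mileage.py | check_divisible
-- ===== SOURCE A (Python) =====
-- def check_divisible(arr):
--     #Loop through the 3 numbers
--     for num in arr:
--         #Converting to string, to find the length of number.
--         str_num = str(num)
--         #Find the rest of dividing. For example: 90000%10000 = 0
--         #We also have to divide by same power to not miss numbers
--         #like 9300.
--         if num % 10**(len(str_num)-1) == 0:
--             if arr.index(num) == 0:
--                 return 2
--             else:
--                 return 1
--     return 0
-- ===== SOURCE B (Python) =====
-- def _is_round(n):
--     # arithmetic roundness: nonneg and stripping trailing zeros leaves a single digit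
--     if n < 0:
--         return False
--     while n >= 10 and n % 10 == 0:
--         n //= 10
--     return n < 10
--
-- def check_divisible(arr):
--     if not arr:
--         return 0
--     if _is_round(arr[0]):
--         return 2
--     return 1 if any(map(_is_round, arr[1:])) else 0
-- ===== Notes on version B (the rewrite author's own statement) =====
-- stated objective: alternative
-- what changed: Replaces the str-conversion/10**(len-1) roundness test with a purely arithmetic test that strips trailing zeros by repeated integer division and checks a single digit remains, and replaces the indexed early-return loop with its arr.index rescan by an empty/first-element case plus an any() existence scan over the tail.
import Mathlib
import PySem

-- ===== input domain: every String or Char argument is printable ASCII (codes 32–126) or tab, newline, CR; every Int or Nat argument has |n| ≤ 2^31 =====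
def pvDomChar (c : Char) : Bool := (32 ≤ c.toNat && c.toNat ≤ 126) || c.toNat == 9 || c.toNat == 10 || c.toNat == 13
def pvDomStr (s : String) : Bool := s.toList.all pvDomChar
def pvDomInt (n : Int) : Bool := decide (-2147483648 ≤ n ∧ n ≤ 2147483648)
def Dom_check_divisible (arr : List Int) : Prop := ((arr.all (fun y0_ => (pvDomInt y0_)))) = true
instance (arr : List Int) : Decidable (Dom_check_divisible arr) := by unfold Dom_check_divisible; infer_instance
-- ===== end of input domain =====

-- B is simpler: a purely arithmetic trailing-zero-stripping roundness test (no string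
-- conversion, no arr.index rescan), with an empty/first-element case plus an existence scan.

-- ===== PORT A =====
-- A's loop over arr, with the whole arr kept for the arr.index(num) call
def chkA (arr : List Int) : List Int → Int
  | [] => 0
  | num :: rest =>
    if PySem.Int.mod num (10 ^ ((PySem.Int.toStr num).length - 1)) == 0 then
      if PySem.List.index? arr num == some 0 then 2 else 1
    else chkA arr rest

def check_divisible (arr : List Int) : Int := chkA arr arr

-- ===== PORT B =====
-- termination helper for the while loop: n //= 10 strictly shrinks n.toNat when 10 ≤ n
theorem pvStrip_dec (n : Int) (h : 10 ≤ n) : (PySem.Int.floordiv n 10).toNat < n.toNat := by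
  have h0 : (0:Int) ≤ n := by omega
  have : PySem.Int.floordiv n 10 = n / 10 := Int.fdiv_eq_ediv_of_nonneg _ (by norm_num)
  omega

-- the 'while n >= 10 and n % 10 == 0: n //= 10' loop of _is_round
def pvStrip (n : Int) : Int :=
  if h : 10 ≤ n ∧ PySem.Int.mod n 10 = 0 then pvStrip (PySem.Int.floordiv n 10) else n
termination_by n.toNat
decreasing_by exact pvStrip_dec n h.1

def isRoundB (n : Int) : Bool :=
  if n < 0 then false else decide (pvStrip n < 10)

def check_divisible_alt (arr : List Int) : Int :=
  match arr with
  | [] => 0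
  | x :: rest => if isRoundB x then 2 else if rest.any isRoundB then 1 else 0

-- ===== PRECONDITION & SPEC =====
def Spec_check_divisible (arr : List Int) (out : Int) : Prop := out = check_divisible_alt arr
instance (arr : List Int) (out : Int) : Decidable (Spec_check_divisible arr out) := by unfold Spec_check_divisible; infer_instance

-- ===== CLAIM (what is proved, stated in full; the proofs are below) =====
def Claim_equal_check_divisible : Prop := ∀ (arr : List Int), Dom_check_divisible arr → Spec_check_divisible arr (check_divisible arr)

-- ===== LEMMAS AND PROOFS =====

-- number of decimal digits of a natural number
def dlen (m : Nat) : Nat :=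
  if m < 10 then 1 else dlen (m / 10) + 1
decreasing_by exact Nat.div_lt_self (by omega) (by omega)

theorem dlen_eq (m : Nat) : dlen m = if m < 10 then 1 else dlen (m / 10) + 1 := by
  rw [dlen]

theorem one_le_dlen (m : Nat) : 1 ≤ dlen m := by
  rw [dlen_eq]; split <;> omega

theorem lt_pow_dlen (m : Nat) : m < 10 ^ dlen m := by
  induction m using Nat.strong_induction_on with
  | _ m ih =>
    rw [dlen_eq]
    split
    · simpa using ‹m < 10›
    · have h10 : 10 ≤ m := by omega
      have := ih (m / 10) (Nat.div_lt_self (by omega) (by omega))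
      calc m < m / 10 * 10 + 10 := by omega
        _ ≤ 10 ^ dlen (m / 10) * 10 := by nlinarith
        _ = 10 ^ (dlen (m / 10) + 1) := by ring

theorem toDigitsCore_len : ∀ (f m : Nat) (l : List Char), m < f →
    (Nat.toDigitsCore 10 f m l).length = dlen m + l.length := by
  intro f
  induction f with
  | zero => intro m l h; omega
  | succ f ih =>
    intro m l h
    rw [Nat.toDigitsCore]
    by_cases hz : m / 10 = 0
    · simp only [hz, if_true, List.length_cons]
      rw [dlen_eq, if_pos (by omega)]
      omega
    · simp only [hz, if_false]
      have hm10 : 10 ≤ m := by omega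
      have hlt : m / 10 < f := by omega
      rw [ih (m / 10) (Nat.digitChar (m % 10) :: l) hlt, dlen_eq m, if_neg (by omega)]
      simp only [List.length_cons]
      omega

theorem toStr_length (n : Int) :
    (PySem.Int.toStr n).length = if n < 0 then dlen n.natAbs + 1 else dlen n.toNat := by
  have h : (PySem.Int.toStr n).length = (PySem.Int.toChars n).length := by
    have := PySem.Int.toList_toStr n
    calc (PySem.Int.toStr n).length = (PySem.Int.toStr n).toList.length := by
          simp [String.length]
      _ = (PySem.Int.toChars n).length := by rw [this]
  rw [h]
  unfold PySem.Int.toChars Nat.toDigits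
  split
  · simp [toDigitsCore_len (n.natAbs + 1) n.natAbs [] (by omega)]
  · simp [toDigitsCore_len (n.toNat + 1) n.toNat [] (by omega)]

-- Nat version of the stripping loop
def stripN (m : Nat) : Nat :=
  if 10 ≤ m ∧ m % 10 = 0 then stripN (m / 10) else m
decreasing_by exact Nat.div_lt_self (by omega) (by omega)

theorem pvStrip_cast (m : Nat) : pvStrip (m : Int) = ((stripN m : Nat) : Int) := by
  induction m using Nat.strong_induction_on with
  | _ m ih =>
    rw [pvStrip, stripN]
    by_cases h : 10 ≤ m ∧ m % 10 = 0
    · have h10 : (10:Int) ≤ (m:Int) := by exact_mod_cast h.1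
      have hmod : PySem.Int.mod (m:Int) 10 = 0 := by
        rw [PySem.Int.mod_eq_zero_iff_dvd]
        exact_mod_cast (Nat.dvd_of_mod_eq_zero h.2)
      rw [dif_pos ⟨h10, hmod⟩, if_pos h]
      have hfd : PySem.Int.floordiv (m:Int) 10 = ((m / 10 : Nat) : Int) := by
        show ((m:Int).fdiv 10) = _
        rw [Int.fdiv_eq_ediv_of_nonneg _ (by norm_num)]
        exact_mod_cast (Int.natCast_ediv m 10).symm
      rw [hfd]
      exact ih (m / 10) (Nat.div_lt_self (by omega) (by omega))
    · rw [if_neg h, dif_neg]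
      intro hc
      apply h
      refine ⟨by exact_mod_cast hc.1, ?_⟩
      have hdvd : (10:Int) ∣ (m:Int) := (PySem.Int.mod_eq_zero_iff_dvd _ _).mp hc.2
      have : (10:Nat) ∣ m := by exact_mod_cast hdvd
      omega

-- core arithmetic fact: divisibility by 10^(digits-1) ↔ stripping ends below 10
theorem keyN : ∀ m : Nat, (10 ^ (dlen m - 1) ∣ m) ↔ stripN m < 10 := by
  intro m
  induction m using Nat.strong_induction_on with
  | _ m ih =>
    rw [stripN]
    by_cases hm : m < 10
    · rw [if_neg (by omega)]
      rw [dlen_eq, if_pos hm]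
      simp [hm]
    · have h10 : 10 ≤ m := by omega
      have hdm : dlen m = dlen (m / 10) + 1 := by
        rw [dlen_eq, if_neg (by omega)]
      have h1 : 1 ≤ dlen (m / 10) := one_le_dlen _
      have hme : m = 10 * (m / 10) + m % 10 := (Nat.div_add_mod m 10).symm ▸ by omega
      by_cases hd : m % 10 = 0
      · rw [if_pos ⟨h10, hd⟩]
        rw [← ih (m / 10) (Nat.div_lt_self (by omega) (by omega))]
        have hiff : 10 ^ (dlen m - 1) ∣ m ↔ 10 ^ (dlen (m / 10) - 1) ∣ m / 10 := by
          have e1 : dlen m - 1 = (dlen (m / 10) - 1) + 1 := by omega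
          rw [e1, pow_succ']
          set k := dlen (m / 10) - 1 with hk
          set q := m / 10 with hq
          rw [show m = 10 * q by omega]
          exact mul_dvd_mul_iff_left (by norm_num : (10:Nat) ≠ 0)
        exact hiff
      · rw [if_neg (fun hc => hd hc.2)]
        constructor
        · intro hdvd
          exfalso
          have : (10:Nat) ∣ m := by
            have h2 : 10 ^ 1 ∣ 10 ^ (dlen m - 1) := by
              apply pow_dvd_pow; omega
            simpa using h2.trans hdvd
          omega
        · intro hcontr; omega

-- the two per-element tests agree
theorem pvRound_eq (n : Int) :
    (PySem.Int.mod n (10 ^ ((PySem.Int.toStr n).length - 1)) == 0) = isRoundB n := by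
  rw [show (PySem.Int.mod n (10 ^ ((PySem.Int.toStr n).length - 1)) == 0)
      = decide (PySem.Int.mod n (10 ^ ((PySem.Int.toStr n).length - 1)) = 0) from rfl]
  unfold isRoundB
  rw [toStr_length]
  by_cases hn : n < 0
  · rw [if_pos hn, if_pos hn]
    simp only [decide_eq_false_iff_not]
    rw [PySem.Int.mod_eq_zero_iff_dvd]
    intro hdvd
    have h1 : 1 ≤ dlen n.natAbs := one_le_dlen _
    have he : dlen n.natAbs + 1 - 1 = dlen n.natAbs := by omega
    rw [he] at hdvd
    have habs : (10:Nat) ^ dlen n.natAbs ∣ n.natAbs := by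
      have := Int.natAbs_dvd_natAbs.mpr hdvd
      simpa using this
    have hlt := lt_pow_dlen n.natAbs
    have hpos : 0 < n.natAbs := by omega
    have := Nat.le_of_dvd hpos habs
    omega
  · rw [if_neg hn, if_neg hn]
    have hcast : n = ((n.toNat : Nat) : Int) := by omega
    rw [hcast, pvStrip_cast]
    simp only [decide_eq_decide, Int.toNat_natCast]
    rw [PySem.Int.mod_eq_zero_iff_dvd,
      show ((10:Int) ^ (dlen n.toNat - 1)) = ((10 ^ (dlen n.toNat - 1) : Nat) : Int) by push_cast; ring,
      Int.natCast_dvd_natCast, keyN]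
    exact_mod_cast Iff.rfl

theorem chkA_cons (arr : List Int) (num : Int) (l : List Int) :
    chkA arr (num :: l) =
      (if isRoundB num then (if PySem.List.index? arr num == some 0 then 2 else 1) else chkA arr l) := by
  rw [chkA, pvRound_eq]

-- When the head x of arr is not round, A's loop over any tail l returns 1 iff some element of l is round
theorem chkA_tail (x : Int) (rest : List Int) (hx : isRoundB x = false) :
    ∀ (l : List Int), chkA (x :: rest) l = (if l.any isRoundB then 1 else 0) := by
  intro l
  induction l with
  | nil => simp [chkA]
  | cons num l' ih =>
    by_cases h : isRoundB num = true
    · have hne : x ≠ num := by intro he; rw [he, h] at hx; exact absurd hx (by simp)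
      have hidx := PySem.List.index?_cons_of_ne (xs := rest) hne
      rw [chkA_cons, hidx]
      simp [List.any_cons, h]
    · have h' : isRoundB num = false := by simpa using h
      rw [chkA_cons]
      simp [List.any_cons, h', ih]

-- ===== VERDICT (by name: the statement is the Claim_ definition above) =====
theorem check_divisible_spec : Claim_equal_check_divisible := by
  intro arr _
  unfold Spec_check_divisible check_divisible check_divisible_alt
  cases arr with
  | nil => simp [chkA]
  | cons x rest =>
    rw [chkA_cons]
    by_cases hx : isRoundB x = true
    · rw [PySem.List.index?_cons_self]
      simp [hx]
    · have hx' : isRoundB x = false := by simpa using hx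
      have h1 := chkA_tail x rest hx' rest
      simp [hx', h1]
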